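-- pv_equiv track=rewrite | github.com/incnone/AdventOfCode | 2015/day5.py | is_nice_p2
-- ===== SOURCE A (Python) =====
-- def is_nice_p2(s):
--     # Needs a doubled letter pair without repeats
--     last_pair = None
--     pairs = set()
--     for c, d in zip(s, s[1:]):
--         if c+d == last_pair:
--             last_pair = None
--             continue
--         elif c+d in pairs:
--             break
--         else:
--             last_pair = c+d
--             pairs.add(c+d)
--     else:
--         return False
--
--     # Don't contain bad substrings
--     if all(c != d for c, d in zip(s, s[2:])):
--         return False
--
--     return True
-- ===== SOURCE B (Python) =====
-- def is_nice_p2(s):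
--     # Brute-force slicing version: a pair at i repeated at some j >= i+2,
--     # and a letter sandwiched between two copies of itself.
--     has_pair = any(s[i:i + 2] == s[j:j + 2]
--                    for i in range(len(s) - 1)
--                    for j in range(i + 2, len(s) - 1))
--     has_sandwich = any(a == b for a, b in zip(s, s[2:]))
--     return has_pair and has_sandwich
-- ===== Notes on version B (the rewrite author's own statement) =====
-- stated objective: alternative
-- what changed: A's single linear pass maintaining a seen-pair set with a last_pair overlap guard is replaced by the idiomatic brute-force formulation: a double scan over positions comparing two-character slices (a pair repeated at distance >= 2) plus a direct any() sandwich test.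
import Mathlib
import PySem

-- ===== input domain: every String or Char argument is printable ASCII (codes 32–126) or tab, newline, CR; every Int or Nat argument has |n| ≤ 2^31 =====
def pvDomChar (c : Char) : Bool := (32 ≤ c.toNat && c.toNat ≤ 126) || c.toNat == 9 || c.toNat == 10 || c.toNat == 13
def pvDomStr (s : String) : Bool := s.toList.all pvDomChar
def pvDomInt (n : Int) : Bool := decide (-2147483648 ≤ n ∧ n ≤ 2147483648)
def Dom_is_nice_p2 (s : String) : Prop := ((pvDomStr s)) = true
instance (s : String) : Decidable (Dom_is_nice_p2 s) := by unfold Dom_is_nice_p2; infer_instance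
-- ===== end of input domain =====

-- B replaces A's single-pass seen-set/last_pair loop by an idiomatic brute-force
-- double scan over slice positions (objective: alternative; same return value everywhere).


-- ===== PORT A =====
-- the for/else loop over zip(s, s[1:]): returns true iff the loop exited via `break`
def nicePairLoop : List (Char × Char) → Option String → PySem.Set String → Bool
  | [], _, _ => false
  | (c, d) :: rest, last_pair, pairs =>
    let cd : String := String.ofList [c, d]    -- c+d, a two-character string
    if some cd = last_pair then nicePairLoop rest none pairs
    else if PySem.Set.contains pairs cd then true
    else nicePairLoop rest (some cd) (PySem.Set.add pairs cd)

def is_nice_p2 (s : String) : Bool :=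
  let cs := s.toList
  if !(nicePairLoop (cs.zip (cs.drop 1)) none PySem.Set.empty) then false  -- for…else: no break → return False
  else if (cs.zip (cs.drop 2)).all (fun p => p.1 != p.2) then false
  else true

-- ===== PORT B =====
-- slices of a string compared as their character lists (string equality = list equality)
def is_nice_p2_alt (s : String) : Bool :=
  let cs := s.toList
  let n : Int := cs.length
  let has_pair := (PySem.List.pyRange 0 (n - 1) 1).any (fun i =>
    (PySem.List.pyRange (i + 2) (n - 1) 1).any (fun j =>
      PySem.List.slice cs (some i) (some (i + 2)) == PySem.List.slice cs (some j) (some (j + 2))))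
  let has_sandwich := (cs.zip (cs.drop 2)).any (fun p => p.1 == p.2)
  has_pair && has_sandwich

-- ===== PRECONDITION & SPEC =====
def Spec_is_nice_p2 (s : String) (out : Bool) : Prop := out = is_nice_p2_alt s
instance (s : String) (out : Bool) : Decidable (Spec_is_nice_p2 s out) := by unfold Spec_is_nice_p2; infer_instance

-- ===== CLAIM (what is proved, stated in full; the proofs are below) =====
def Claim_equal_is_nice_p2 : Prop := ∀ (s : String), Dom_is_nice_p2 s → Spec_is_nice_p2 s (is_nice_p2 s)

-- ===== LEMMAS AND PROOFS =====

-- the break-free transition of A's loop on the state (last_pair, pairs)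
def stStep (st : Option String × PySem.Set String) (p : Char × Char) :
    Option String × PySem.Set String :=
  let cd := String.ofList [p.1, p.2]
  if some cd = st.1 then (none, st.2) else (some cd, PySem.Set.add st.2 cd)

-- A's loop breaks iff some index k satisfies the break condition in the state
-- obtained by folding the break-free transition over the first k pairs
lemma loop_iff (ps : List (Char × Char)) (st : Option String × PySem.Set String) :
    nicePairLoop ps st.1 st.2 = true ↔
      ∃ k : Nat, ∃ h : k < ps.length,
        some (String.ofList [ps[k].1, ps[k].2]) ≠ ((ps.take k).foldl stStep st).1 ∧
        PySem.Set.contains ((ps.take k).foldl stStep st).2 (String.ofList [ps[k].1, ps[k].2]) = true := by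
  induction ps generalizing st with
  | nil => simp [nicePairLoop]
  | cons p rest ih =>
    obtain ⟨c, d⟩ := p
    simp only [nicePairLoop]
    by_cases h1 : some (String.ofList [c, d]) = st.1
    · rw [if_pos h1]
      have hst : stStep st (c, d) = (none, st.2) := by simp [stStep, h1]
      have h := ih (none, st.2)
      rw [show nicePairLoop rest none st.2 = nicePairLoop rest (none, st.2).1 (none, st.2).2 from rfl, h]
      constructor
      · rintro ⟨k, hk, hne, hmem⟩
        refine ⟨k + 1, by simpa using Nat.succ_lt_succ hk, ?_, ?_⟩
        · simpa [List.take_succ_cons, hst] using hne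
        · simpa [List.take_succ_cons, hst] using hmem
      · rintro ⟨k, hk, hne, hmem⟩
        cases k with
        | zero => simp at hne; exact absurd h1 (by simpa using hne)
        | succ k =>
          refine ⟨k, by simpa using hk, ?_, ?_⟩
          · simpa [List.take_succ_cons, hst] using hne
          · simpa [List.take_succ_cons, hst] using hmem
    · rw [if_neg h1]
      by_cases h2 : PySem.Set.contains st.2 (String.ofList [c, d]) = true
      · rw [if_pos h2]
        simp only [true_iff]
        exact ⟨0, by simp, by simpa using h1, by simpa using h2⟩
      · rw [if_neg h2]
        have hst : stStep st (c, d) = (some (String.ofList [c, d]), PySem.Set.add st.2 (String.ofList [c, d])) := by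
          simp [stStep, h1]
        have h := ih (some (String.ofList [c, d]), PySem.Set.add st.2 (String.ofList [c, d]))
        rw [show nicePairLoop rest (some (String.ofList [c, d])) (PySem.Set.add st.2 (String.ofList [c, d])) =
          nicePairLoop rest (some (String.ofList [c, d]), PySem.Set.add st.2 (String.ofList [c, d])).1
            (some (String.ofList [c, d]), PySem.Set.add st.2 (String.ofList [c, d])).2 from rfl, h]
        constructor
        · rintro ⟨k, hk, hne, hmem⟩
          refine ⟨k + 1, by simpa using Nat.succ_lt_succ hk, ?_, ?_⟩
          · simpa [List.take_succ_cons, hst] using hne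
          · simpa [List.take_succ_cons, hst] using hmem
        · rintro ⟨k, hk, hne, hmem⟩
          cases k with
          | zero => simp at hmem; exact absurd (by simpa using hmem) h2
          | succ k =>
            refine ⟨k, by simpa using hk, ?_, ?_⟩
            · simpa [List.take_succ_cons, hst] using hne
            · simpa [List.take_succ_cons, hst] using hmem

lemma stStep_inv (st : Option String × PySem.Set String) (p : Char × Char)
    (_hinv : ∀ y, st.1 = some y → PySem.Set.contains st.2 y = true) :
    ∀ y, (stStep st p).1 = some y → PySem.Set.contains (stStep st p).2 y = true := by
  intro y hy
  simp only [stStep] at hy ⊢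
  split at hy
  · simp at hy
  · simp only at hy ⊢
    rw [if_neg (by assumption)]
    simp only [Option.some.injEq] at hy
    subst hy
    simp [pysem]

-- membership in the folded `pairs` set = value of some processed pair
lemma seen_mem (l : List (Char × Char)) (st : Option String × PySem.Set String)
    (hinv : ∀ y, st.1 = some y → PySem.Set.contains st.2 y = true) (x : String) :
    PySem.Set.contains ((l.foldl stStep st).2) x = true ↔
      PySem.Set.contains st.2 x = true ∨ ∃ i : Nat, ∃ h : i < l.length, String.ofList [l[i].1, l[i].2] = x := by
  induction l generalizing st with
  | nil => simp
  | cons p rest ih =>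
    rw [List.foldl_cons, ih (stStep st p) (stStep_inv st p hinv)]
    have hstep : PySem.Set.contains (stStep st p).2 x = true ↔
        PySem.Set.contains st.2 x = true ∨ x = String.ofList [p.1, p.2] := by
      simp only [stStep]
      split
      · rename_i hres
        constructor
        · exact Or.inl
        · rintro (h | rfl)
          · exact h
          · exact hinv _ hres.symm
      · simp [pysem]
    rw [hstep]
    constructor
    · rintro ((h | rfl) | ⟨i, hi, hx⟩)
      · exact Or.inl h
      · exact Or.inr ⟨0, by simp, by simp⟩
      · exact Or.inr ⟨i + 1, by simpa using Nat.succ_lt_succ hi, by simpa using hx⟩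
    · rintro (h | ⟨i, hi, hx⟩)
      · exact Or.inl (Or.inl h)
      · cases i with
        | zero => exact Or.inl (Or.inr (by simpa using hx.symm))
        | succ i => exact Or.inr ⟨i, by simpa using hi, by simpa using hx⟩

lemma take_foldl_succ (ps : List (Char × Char)) (k : Nat) (hk : k < ps.length)
    (st : Option String × PySem.Set String) :
    (ps.take (k + 1)).foldl stStep st = stStep ((ps.take k).foldl stStep st) (ps[k]) := by
  rw [List.take_add_one, List.getElem?_eq_getElem hk, List.foldl_append]
  simp

-- a `some` last_pair always records the previous pair, added by the final `else` branch
lemma last_of_fold (ps : List (Char × Char)) (k : Nat) (hk : k ≤ ps.length) (y : String)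
    (h : ((ps.take k).foldl stStep (none, PySem.Set.empty)).1 = some y) :
    ∃ m, m + 1 = k ∧ ∃ hm : m < ps.length, y = String.ofList [ps[m].1, ps[m].2] ∧
      some (String.ofList [ps[m].1, ps[m].2]) ≠ ((ps.take m).foldl stStep (none, PySem.Set.empty)).1 := by
  cases k with
  | zero => simp at h
  | succ m =>
    have hm : m < ps.length := by omega
    rw [take_foldl_succ ps m hm] at h
    simp only [stStep] at h
    split at h
    · simp at h
    · rename_i hcond
      simp only [Option.some.injEq] at h
      exact ⟨m, rfl, hm, h.symm, hcond⟩

lemma mk_inj {a b c d : Char} (h : String.ofList [a, b] = String.ofList [c, d]) : a = c ∧ b = d := by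
  rw [String.ofList_inj] at h
  simpa using h

-- A's pair loop breaks iff some pair repeats at distance ≥ 2
lemma broke_iff (ps : List (Char × Char)) :
    nicePairLoop ps none PySem.Set.empty = true ↔
      ∃ i j : Nat, ∃ h2 : i + 2 ≤ j, ∃ hj : j < ps.length, ps[i]'(by omega) = ps[j] := by
  have hinv0 : ∀ y : String, ((none, PySem.Set.empty) : Option String × PySem.Set String).1 = some y →
      PySem.Set.contains ((none, PySem.Set.empty) : Option String × PySem.Set String).2 y = true := by simp
  rw [show nicePairLoop ps none PySem.Set.empty =
    nicePairLoop ps (none, (PySem.Set.empty : PySem.Set String)).1 (none, PySem.Set.empty).2 from rfl,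
    loop_iff ps (none, PySem.Set.empty)]
  constructor
  · rintro ⟨k, hk, hne, hmem⟩
    rw [seen_mem _ _ hinv0] at hmem
    rcases hmem with hmem | ⟨i, hi, hx⟩
    · simp at hmem
    · have hilt : i < k := by rw [List.length_take] at hi; omega
      have hips : i < ps.length := by omega
      rw [List.getElem_take] at hx
      have heq : ps[i] = ps[k] := by
        have := mk_inj hx
        exact Prod.ext this.1 this.2
      by_cases hik : i + 2 ≤ k
      · exact ⟨i, k, hik, hk, heq⟩
      · have hik1 : i + 1 = k := by omega
        subst hik1
        rw [take_foldl_succ ps i hips] at hne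
        simp only [stStep] at hne
        split at hne
        · rename_i hres
          obtain ⟨m, hm1, hmlt, hy, _⟩ := last_of_fold ps i (by omega) _ hres.symm
          refine ⟨m, i + 1, by omega, hk, ?_⟩
          have : ps[m] = ps[i] := by
            have := mk_inj hy.symm
            exact Prod.ext this.1 this.2
          rw [this]; exact heq
        · exact absurd hx.symm (by simpa using hne)
  · rintro ⟨i, j, h2, hj, heq⟩
    have hi : i < ps.length := by omega
    have hmk : String.ofList [ps[i].1, ps[i].2] = String.ofList [ps[j].1, ps[j].2] := by rw [heq]
    by_cases hne : some (String.ofList [ps[j].1, ps[j].2]) = ((ps.take j).foldl stStep (none, PySem.Set.empty)).1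
    · obtain ⟨m, hm1, hmlt, hy, hprev⟩ := last_of_fold ps j (le_of_lt hj) _ hne.symm
      refine ⟨m, hmlt, hprev, ?_⟩
      rw [seen_mem _ _ hinv0]
      refine Or.inr ⟨i, by rw [List.length_take]; omega, ?_⟩
      rw [List.getElem_take, hmk, ← hy]
    · refine ⟨j, hj, hne, ?_⟩
      rw [seen_mem _ _ hinv0]
      refine Or.inr ⟨i, by rw [List.length_take]; omega, ?_⟩
      rw [List.getElem_take, hmk]

lemma take_two_drop (cs : List Char) (a : Nat) (h : a + 1 < cs.length) :
    (cs.drop a).take 2 = [cs[a], cs[a+1]] := by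
  have h1 : cs.drop a = cs[a] :: cs.drop (a+1) := List.drop_eq_getElem_cons (by omega)
  have h2 : cs.drop (a+1) = cs[a+1] :: cs.drop (a+2) := List.drop_eq_getElem_cons (by omega)
  rw [h1, h2]
  rfl

lemma zip_pair_get (cs : List Char) (k : Nat) (h : k + 1 < cs.length) :
    (cs.zip (cs.drop 1))[k]'(by simp; omega) = (cs[k], cs[k+1]) := by
  rw [List.getElem_zip]
  simp

lemma slice_two (cs : List Char) (i : Int) (h0 : 0 ≤ i) :
    PySem.List.slice cs (some i) (some (i+2)) = (cs.drop i.toNat).take 2 := by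
  rw [PySem.List.slice_toNat _ h0 (by omega)]
  congr 1
  omega

-- B's double scan computes the same repeat-pair condition
lemma alt_pair_iff (cs : List Char) :
    ((PySem.List.pyRange 0 ((cs.length : Int) - 1) 1).any (fun i =>
      (PySem.List.pyRange (i + 2) ((cs.length : Int) - 1) 1).any (fun j =>
        PySem.List.slice cs (some i) (some (i + 2)) == PySem.List.slice cs (some j) (some (j + 2)))) = true) ↔
      ∃ i j : Nat, ∃ h2 : i + 2 ≤ j, ∃ hj : j < (cs.zip (cs.drop 1)).length,
        (cs.zip (cs.drop 1))[i]'(by omega) = (cs.zip (cs.drop 1))[j] := by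
  simp only [List.any_eq_true, PySem.List.mem_pyRange_one, beq_iff_eq]
  constructor
  · rintro ⟨i, ⟨hi0, hin⟩, j, ⟨hij, hjn⟩, hsl⟩
    have hiN : i.toNat + 1 < cs.length := by omega
    have hjN : j.toNat + 1 < cs.length := by omega
    rw [slice_two _ _ hi0, slice_two _ _ (by omega), take_two_drop _ _ hiN, take_two_drop _ _ hjN] at hsl
    refine ⟨i.toNat, j.toNat, by omega, by simp; omega, ?_⟩
    rw [zip_pair_get _ _ hiN, zip_pair_get _ _ hjN]
    simp only [List.cons.injEq, and_true] at hsl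
    exact Prod.ext hsl.1 hsl.2
  · rintro ⟨a, b, hab, hb, heq⟩
    have hbN : b + 1 < cs.length := by simp at hb; omega
    have haN : a + 1 < cs.length := by omega
    rw [zip_pair_get _ _ haN, zip_pair_get _ _ hbN] at heq
    refine ⟨(a : Int), ⟨by omega, by omega⟩, (b : Int), ⟨by omega, by omega⟩, ?_⟩
    rw [slice_two _ _ (by omega), slice_two _ _ (by omega)]
    have : ((a : Int)).toNat = a := by omega
    rw [this, show ((b : Int)).toNat = b from by omega, take_two_drop _ _ haN, take_two_drop _ _ hbN]
    simp only [Prod.ext_iff] at heq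
    rw [heq.1, heq.2]

-- not-all-different = any-equal (A's negated sandwich test vs B's direct one)
lemma sandwich_eq (l : List (Char × Char)) :
    (l.all fun p => p.1 != p.2) = !(l.any fun p => p.1 == p.2) := by
  rw [List.not_any_eq_all_not]
  simp [bne]

-- ===== VERDICT (by name: the statement is the Claim_ definition above) =====
theorem is_nice_p2_spec : Claim_equal_is_nice_p2 := by
  intro s _
  unfold Spec_is_nice_p2 is_nice_p2 is_nice_p2_alt
  have hb : nicePairLoop (s.toList.zip (s.toList.drop 1)) none PySem.Set.empty
      = ((PySem.List.pyRange 0 ((s.toList.length : Int) - 1) 1).any fun i =>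
        (PySem.List.pyRange (i + 2) ((s.toList.length : Int) - 1) 1).any fun j =>
          PySem.List.slice s.toList (some i) (some (i + 2)) ==
            PySem.List.slice s.toList (some j) (some (j + 2))) := by
    rw [Bool.eq_iff_iff, broke_iff, alt_pair_iff]
  simp only [sandwich_eq]
  rw [hb]
  generalize ((PySem.List.pyRange 0 ((s.toList.length : Int) - 1) 1).any _) = b1
  generalize ((s.toList.zip (s.toList.drop 2)).any _) = b2
  cases b1 <;> cases b2 <;> rfl
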